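-- pv_equiv track=rewrite | github.com/Tetiana2370/python | zestaw4/z2.py | get_mesh
-- ===== SOURCE A (Python) =====
-- def get_mesh(h=3, w=3 ):
--     spaces = 4
--     if h<0 or w<0:
--         h, w = abs(h) ,abs(w)
--
--     L = list()
--     for i in range (h*2 + 1):
--         for j in range (w*spaces +1):
--             if(i%2 == 0):
--                 if(j%spaces == 0):
--                     L+=("+")
--
--                 else:
--                     L+=("-")
--             else:
--                 if(j%spaces == 0):
--                     L+=("|")
--                 else:
--                     L+=(" ")
--             if(j == w*spaces):
--                 L+=("\n")
--
--     return "".join(L)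
-- ===== SOURCE B (Python) =====
-- def get_mesh(h=3, w=3):
--     if h < 0 or w < 0:
--         h, w = abs(h), abs(w)
--     horiz = "+" + "---+" * w + "\n"
--     vert = "|" + "   |" * w + "\n"
--     return "".join(horiz if i % 2 == 0 else vert for i in range(2 * h + 1))
-- ===== Notes on version B (the rewrite author's own statement) =====
-- stated objective: simpler
-- what changed: Replaces A's nested per-character loops with modulo tests by building two whole-row strings via string repetition and concatenating them alternately, one row per index.
import Mathlib
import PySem

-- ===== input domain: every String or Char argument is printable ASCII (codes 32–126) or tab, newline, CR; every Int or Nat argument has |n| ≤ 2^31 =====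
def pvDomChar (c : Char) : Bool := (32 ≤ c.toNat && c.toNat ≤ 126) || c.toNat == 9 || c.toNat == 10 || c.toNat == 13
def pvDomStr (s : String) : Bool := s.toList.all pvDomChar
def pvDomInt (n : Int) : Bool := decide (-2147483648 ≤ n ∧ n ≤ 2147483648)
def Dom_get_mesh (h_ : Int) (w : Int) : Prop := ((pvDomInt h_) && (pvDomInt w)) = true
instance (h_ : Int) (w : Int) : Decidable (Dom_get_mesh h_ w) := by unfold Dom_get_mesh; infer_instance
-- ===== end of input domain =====

-- B replaces A's per-character nested loops with whole-row string repetition (one "+---+…" / "|   |…" row per row index); objective: simpler.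

-- ===== PORT A =====
def get_mesh (h_ : Int) (w : Int) : String :=
  let spaces : Int := 4
  let hw := if h_ < 0 ∨ w < 0 then (|h_|, |w|) else (h_, w)
  let h := hw.1
  let w := hw.2
  let L : List Char :=
    (PySem.List.pyRange 0 (h * 2 + 1) 1).foldl (fun L i =>
      (PySem.List.pyRange 0 (w * spaces + 1) 1).foldl (fun L j =>
        let L := if PySem.Int.mod i 2 = 0 then
            (if PySem.Int.mod j spaces = 0 then L ++ ['+'] else L ++ ['-'])
          else
            (if PySem.Int.mod j spaces = 0 then L ++ ['|'] else L ++ [' '])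
        if j = w * spaces then L ++ ['\n'] else L) L) []
  String.ofList L

-- ===== PORT B =====
-- Python's  s * n  for a string (in List Char form): n concatenated copies, empty for n ≤ 0
def strTimes (cs : List Char) (n : Int) : List Char :=
  (List.range n.toNat).foldl (fun acc _ => acc ++ cs) []

def get_mesh_alt (h_ : Int) (w : Int) : String :=
  let hw := if h_ < 0 ∨ w < 0 then (|h_|, |w|) else (h_, w)
  let h := hw.1
  let w := hw.2
  let horiz : List Char := '+' :: strTimes "---+".toList w ++ ['\n']
  let vert : List Char := '|' :: strTimes "   |".toList w ++ ['\n']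
  String.ofList (((PySem.List.pyRange 0 (2 * h + 1) 1).map
      (fun i => if PySem.Int.mod i 2 = 0 then horiz else vert)).flatten)

-- ===== PRECONDITION & SPEC =====
def Spec_get_mesh (h_ : Int) (w : Int) (out : String) : Prop := out = get_mesh_alt h_ w
instance (h_ : Int) (w : Int) (out : String) : Decidable (Spec_get_mesh h_ w out) := by unfold Spec_get_mesh; infer_instance

-- ===== CLAIM (what is proved, stated in full; the proofs are below) =====
def Claim_equal_get_mesh : Prop := ∀ (h_ : Int) (w : Int), Dom_get_mesh h_ w → Spec_get_mesh h_ w (get_mesh h_ w)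

-- ===== LEMMAS AND PROOFS =====

-- one grid cell of A's inner loop (without the end-of-row newline)
def meshCell (bar fill : Char) (j : Int) : List Char :=
  if PySem.Int.mod j 4 = 0 then [bar] else [fill]

theorem strTimes_succ (cs : List Char) (n : Nat) :
    strTimes cs ((n : Int) + 1) = strTimes cs (n : Int) ++ cs := by
  have h : ((n : Int) + 1) = ((n + 1 : Nat) : Int) := by push_cast; ring
  rw [h]
  simp [strTimes, List.range_succ]

-- rotation: n copies of [bar,f,f,f] then bar  =  bar then n copies of [f,f,f,bar]
theorem strTimes_rot (bar fill : Char) (n : Nat) :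
    strTimes [bar, fill, fill, fill] (n : Int) ++ [bar]
      = bar :: strTimes [fill, fill, fill, bar] (n : Int) := by
  induction n with
  | zero => rfl
  | succ k ih =>
    rw [Nat.cast_add, Nat.cast_one, strTimes_succ, strTimes_succ, List.append_assoc,
        show [bar,fill,fill,fill]++[bar] = [bar]++[fill,fill,fill,bar] from rfl,
        ← List.append_assoc, ih]
    simp

theorem flat_cells (bar fill : Char) (n : Nat) :
    (PySem.List.pyRange 0 ((n : Int) * 4) 1).flatMap (meshCell bar fill)
      = strTimes [bar, fill, fill, fill] (n : Int) := by
  induction n with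
  | zero => rfl
  | succ k ih =>
    have hsplit : PySem.List.pyRange 0 (((k:Nat)+1 : Int) * 4) 1
        = PySem.List.pyRange 0 ((k:Int)*4) 1 ++ PySem.List.pyRange ((k:Int)*4) ((k:Int)*4+4) 1 := by
      have := PySem.List.pyRange_one_append 0 ((k:Int)*4) (((k:Nat)+1:Int)*4) (by positivity) (by omega)
      rw [this]; congr 1; · ring_nf
    push_cast
    rw [hsplit, List.flatMap_append, ih, strTimes_succ]
    congr 1
    have e1 : PySem.List.pyRange ((k:Int)*4) ((k:Int)*4+4) 1
        = [(k:Int)*4, (k:Int)*4+1, (k:Int)*4+2, (k:Int)*4+3] := by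
      rw [PySem.List.pyRange_one_cons (by omega), PySem.List.pyRange_one_cons (by omega),
          PySem.List.pyRange_one_cons (by omega), PySem.List.pyRange_one_cons (by omega),
          PySem.List.pyRange_one_eq_nil (by omega)]
      norm_num
      omega
    rw [e1]
    simp [meshCell]

theorem flat_row (bar fill : Char) (n : Nat) :
    (PySem.List.pyRange 0 ((n : Int) * 4 + 1) 1).flatMap
        (fun j => meshCell bar fill j ++ if j = (n : Int) * 4 then ['\n'] else [])
      = bar :: strTimes [fill, fill, fill, bar] (n : Int) ++ ['\n'] := by
  rw [PySem.List.pyRange_one_succ_right (by positivity), List.flatMap_append]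
  have hfront : (PySem.List.pyRange 0 ((n : Int) * 4) 1).flatMap
        (fun j => meshCell bar fill j ++ if j = (n : Int) * 4 then ['\n'] else [])
      = (PySem.List.pyRange 0 ((n : Int) * 4) 1).flatMap (meshCell bar fill) := by
    unfold List.flatMap
    congr 1
    apply List.map_congr_left
    intro j hj
    rw [PySem.List.mem_pyRange_one] at hj
    rw [if_neg (by omega)]
    simp
  rw [hfront, flat_cells]
  have hlast : List.flatMap
        (fun j => meshCell bar fill j ++ if j = (n : Int) * 4 then ['\n'] else []) [(n : Int) * 4]
      = [bar, '\n'] := by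
    have m0 : PySem.Int.mod ((n:Int)*4) 4 = 0 := by
      rw [PySem.Int.mod_eq_emod_of_pos (by norm_num)]; omega
    simp [meshCell]
  rw [hlast, show [bar, '\n'] = [bar] ++ ['\n'] from rfl, ← List.append_assoc, strTimes_rot]

theorem inner_loop_eq (i w : Int) (L : List Char) :
    (PySem.List.pyRange 0 (w * 4 + 1) 1).foldl (fun L j =>
        let L := if PySem.Int.mod i 2 = 0 then
            (if PySem.Int.mod j 4 = 0 then L ++ ['+'] else L ++ ['-'])
          else
            (if PySem.Int.mod j 4 = 0 then L ++ ['|'] else L ++ [' '])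
        if j = w * 4 then L ++ ['\n'] else L) L
      = L ++ (PySem.List.pyRange 0 (w * 4 + 1) 1).flatMap
          (fun j => (if PySem.Int.mod i 2 = 0 then meshCell '+' '-' j else meshCell '|' ' ' j)
              ++ if j = w * 4 then ['\n'] else []) := by
  have hb : (fun (L : List Char) (j : Int) =>
        let L := if PySem.Int.mod i 2 = 0 then
            (if PySem.Int.mod j 4 = 0 then L ++ ['+'] else L ++ ['-'])
          else
            (if PySem.Int.mod j 4 = 0 then L ++ ['|'] else L ++ [' '])
        if j = w * 4 then L ++ ['\n'] else L)
      = fun L j => L ++ ((if PySem.Int.mod i 2 = 0 then meshCell '+' '-' j else meshCell '|' ' ' j)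
              ++ if j = w * 4 then ['\n'] else []) := by
    funext L j
    simp only [meshCell]
    split_ifs <;> simp
  rw [hb, PySem.List.foldl_append_eq_flatMap]

theorem core_eq (h w : Int) (_hh : 0 ≤ h) (hw : 0 ≤ w) :
    (PySem.List.pyRange 0 (h * 2 + 1) 1).foldl (fun L i =>
      (PySem.List.pyRange 0 (w * 4 + 1) 1).foldl (fun L j =>
        let L := if PySem.Int.mod i 2 = 0 then
            (if PySem.Int.mod j 4 = 0 then L ++ ['+'] else L ++ ['-'])
          else
            (if PySem.Int.mod j 4 = 0 then L ++ ['|'] else L ++ [' '])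
        if j = w * 4 then L ++ ['\n'] else L) L) []
    = ((PySem.List.pyRange 0 (2 * h + 1) 1).map
        (fun i => if PySem.Int.mod i 2 = 0
          then '+' :: strTimes "---+".toList w ++ ['\n']
          else '|' :: strTimes "   |".toList w ++ ['\n'])).flatten := by
  obtain ⟨n, rfl⟩ := Int.eq_ofNat_of_zero_le hw
  have hrow : ∀ i : Int,
      (PySem.List.pyRange 0 ((n : Int) * 4 + 1) 1).flatMap
          (fun j => (if PySem.Int.mod i 2 = 0 then meshCell '+' '-' j else meshCell '|' ' ' j)
              ++ if j = (n : Int) * 4 then ['\n'] else [])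
        = (if PySem.Int.mod i 2 = 0
            then '+' :: strTimes "---+".toList (n : Int) ++ ['\n']
            else '|' :: strTimes "   |".toList (n : Int) ++ ['\n']) := by
    intro i
    by_cases hp : PySem.Int.mod i 2 = 0
    · simp only [hp, if_pos]
      simpa using flat_row '+' '-' n
    · simp only [hp, ite_false]
      simpa using flat_row '|' ' ' n
  have houter : (fun (L : List Char) (i : Int) =>
      (PySem.List.pyRange 0 ((n : Int) * 4 + 1) 1).foldl (fun L j =>
        let L := if PySem.Int.mod i 2 = 0 then
            (if PySem.Int.mod j 4 = 0 then L ++ ['+'] else L ++ ['-'])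
          else
            (if PySem.Int.mod j 4 = 0 then L ++ ['|'] else L ++ [' '])
        if j = (n : Int) * 4 then L ++ ['\n'] else L) L)
      = fun L i => L ++ (if PySem.Int.mod i 2 = 0
            then '+' :: strTimes "---+".toList (n : Int) ++ ['\n']
            else '|' :: strTimes "   |".toList (n : Int) ++ ['\n']) := by
    funext L i
    rw [inner_loop_eq, hrow]
  rw [houter, PySem.List.foldl_append_eq_flatMap, List.nil_append, mul_comm h 2]
  rfl

-- ===== VERDICT (by name: the statement is the Claim_ definition above) =====
theorem get_mesh_spec : Claim_equal_get_mesh := by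
  intro h_ w0 _
  unfold Spec_get_mesh get_mesh get_mesh_alt
  have hnn : 0 ≤ (if h_ < 0 ∨ w0 < 0 then (|h_|, |w0|) else (h_, w0)).1
      ∧ 0 ≤ (if h_ < 0 ∨ w0 < 0 then (|h_|, |w0|) else (h_, w0)).2 := by
    split_ifs with hc
    · exact ⟨abs_nonneg _, abs_nonneg _⟩
    · exact ⟨le_of_not_gt fun h => hc (Or.inl h), le_of_not_gt fun h => hc (Or.inr h)⟩
  simp only []
  congr 1
  exact core_eq _ _ hnn.1 hnn.2
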